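-- pv_equiv track=rewrite | github.com/kms1234567/Study | graph/[PGM]전력망을_둘로_나누기.py | solution
-- ===== SOURCE A (Python) =====
-- from collections import defaultdict
--
-- def dfs(graph, visited, node):
--     cnt = 0
--     for v in graph[node]:
--         if not visited[v]:
--             visited[v] = True
--             cnt += dfs(graph, visited, v)
--     return cnt + 1
--
-- def solution(n, wires):
--     answer = 100
--     graph = defaultdict(list)
--
--     for a, b in wires:
--         graph[a].append(b)
--         graph[b].append(a)
--
--     for a, b in wires:
--         visited = [False] * (n+1)
--         visited[a] = True;visited[b]=True
--         a_cnt = dfs(graph, visited, a)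
--         b_cnt = dfs(graph, visited, b)
--
--         answer = min(answer, abs(a_cnt - b_cnt))
--
--     return answer
-- ===== SOURCE B (Python) =====
-- def _bfs_size(adj, seen, start):
--     # level-order BFS: counts whole frontiers; newly seen nodes form the next frontier
--     frontier = [start]
--     size = 0
--     while frontier:
--         size += len(frontier)
--         nxt = []
--         for u in frontier:
--             for v in adj[u]:
--                 if not seen[v]:
--                     seen[v] = True
--                     nxt.append(v)
--         frontier = nxt
--     return size
--
-- def solution(n, wires):
--     directed = list(wires) + [(b, a) for a, b in wires]
--     adj = [[] for _ in range(n + 1)]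
--     for u, v in directed:
--         adj[u].append(v)
--     best = 100
--     for a, b in wires:
--         seen = [False] * (n + 1)
--         seen[a] = seen[b] = True
--         ca = _bfs_size(adj, seen, a)
--         cb = _bfs_size(adj, seen, b)
--         best = min(best, abs(ca - cb))
--     return best
-- ===== Notes on version B (the rewrite author's own statement) =====
-- stated objective: alternative
-- what changed: Replaces A's recursive per-edge DFS over a defaultdict with a level-order BFS that counts whole frontiers over a list-of-lists adjacency built in one pass from the doubled directed edge list.
-- outside the precondition, e.g. on solution(1, [(-1, 0)]): A returns 0, B returns 0; on solution(5, [(0, 5), (-6, 2)]): A returns 0, B returns 1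
import Mathlib
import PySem

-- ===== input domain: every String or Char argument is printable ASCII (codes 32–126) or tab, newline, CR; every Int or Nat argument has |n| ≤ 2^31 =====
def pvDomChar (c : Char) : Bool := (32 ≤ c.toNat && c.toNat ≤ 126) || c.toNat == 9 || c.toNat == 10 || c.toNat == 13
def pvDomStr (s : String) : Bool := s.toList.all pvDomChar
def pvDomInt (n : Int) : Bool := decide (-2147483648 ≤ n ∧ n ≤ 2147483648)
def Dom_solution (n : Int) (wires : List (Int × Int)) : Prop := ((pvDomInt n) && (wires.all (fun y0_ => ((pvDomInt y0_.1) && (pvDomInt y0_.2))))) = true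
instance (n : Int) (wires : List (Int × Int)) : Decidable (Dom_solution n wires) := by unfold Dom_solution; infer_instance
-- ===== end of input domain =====

-- B replaces A's recursive per-edge DFS over a defaultdict with a level-order
-- BFS counting whole frontiers, over a list-of-lists adjacency built in one
-- pass from the doubled directed edge list (alternative decomposition;
-- return value only — the Python versions mutate only locals).

-- ===== PORT A =====
-- A's dfs: recursion with a mutated visited list; ported with the visited list
-- threaded through, fuel only as a totality guard (never hit: see dfsA_post).
def dfsA (g : PySem.Dict Int (List Int)) : Nat → List Bool → Int → Int × List Bool
  | 0, vis, _ => (1, vis)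
  | fuel+1, vis, node =>
    let r := (g.getD node []).foldl
      (fun (st : Int × List Bool) v =>
        if PySem.List.pyGetD st.2 v true = false then
          let st2 := dfsA g fuel (PySem.List.pySetD st.2 v true) v
          (st.1 + st2.1, st2.2)
        else st) (0, vis)
    (r.1 + 1, r.2)

-- graph[a].append(b) on a defaultdict(list) is Dict.modify with default []
def buildA (wires : List (Int × Int)) : PySem.Dict Int (List Int) :=
  wires.foldl (fun g p =>
    (g.modify p.1 [] (· ++ [p.2])).modify p.2 [] (· ++ [p.1])) PySem.Dict.empty

def solution (n : Int) (wires : List (Int × Int)) : Int :=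
  let graph := buildA wires
  wires.foldl (fun answer p =>
    let vis0 := List.replicate (n+1).toNat false
    let vis1 := PySem.List.pySetD vis0 p.1 true
    let vis2 := PySem.List.pySetD vis1 p.2 true
    let r1 := dfsA graph (vis2.length + 1) vis2 p.1
    let r2 := dfsA graph (r1.2.length + 1) r1.2 p.2
    min answer |r1.1 - r2.1|) 100

-- ===== PORT B =====
-- B's _bfs_size: level-order BFS; the frontier is counted whole, the newly
-- seen nodes become the next frontier; the Python mutates seen in place, the
-- port threads it through and returns it alongside the size; fuel is a
-- totality guard only (never hit: see bfsB_post).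
def bfsB (adj : List (List Int)) : Nat → List Bool → List Int → Int → Int × List Bool
  | 0, seen, _, size => (size, seen)
  | fuel+1, seen, frontier, size =>
    if frontier.isEmpty then (size, seen)
    else
      let size2 := size + (frontier.length : Int)
      let st := frontier.foldl (fun (st : List Bool × List Int) u =>
        (PySem.List.pyGetD adj u []).foldl (fun (st2 : List Bool × List Int) v =>
          if PySem.List.pyGetD st2.1 v true = false then
            (PySem.List.pySetD st2.1 v true, st2.2 ++ [v])
          else st2) st) (seen, [])
      bfsB adj fuel st.1 st.2 size2

-- directed = list(wires) + [(b, a) for a, b in wires]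
def directedB (wires : List (Int × Int)) : List (Int × Int) :=
  wires ++ wires.map (fun p => (p.2, p.1))

-- adj = [[] for _ in range(n+1)]; adj[u].append(v) over the directed list
def buildB (n : Int) (wires : List (Int × Int)) : List (List Int) :=
  (directedB wires).foldl
    (fun adj p => PySem.List.pySetD adj p.1 (PySem.List.pyGetD adj p.1 [] ++ [p.2]))
    (List.replicate (n+1).toNat [])

def solution_alt (n : Int) (wires : List (Int × Int)) : Int :=
  let adj := buildB n wires
  wires.foldl (fun best p =>
    let seen0 := List.replicate (n+1).toNat false
    let seen1 := PySem.List.pySetD seen0 p.1 true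
    let seen2 := PySem.List.pySetD seen1 p.2 true
    let r1 := bfsB adj ((n+1).toNat + 2) seen2 [p.1] 0
    let r2 := bfsB adj ((n+1).toNat + 2) r1.2 [p.2] 0
    min best |r1.1 - r2.1|) 100

-- ===== PRECONDITION & SPEC =====
-- Pre_ restricts node labels to the valid vertex indices 0..n of the
-- visited array: labels outside [-(n+1), n] make A raise IndexError, and
-- negative in-range labels are accepted by A only through Python's
-- negative-index wraparound (distinct labels share a visited slot), an
-- artefact of A's list indexing that we exclude.
def Pre_solution (n : Int) (wires : List (Int × Int)) : Prop :=
  ∀ p ∈ wires, (0 ≤ p.1 ∧ p.1 ≤ n) ∧ (0 ≤ p.2 ∧ p.2 ≤ n)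
instance (n : Int) (wires : List (Int × Int)) : Decidable (Pre_solution n wires) := by
  unfold Pre_solution; infer_instance

def pvWitness_solution : Int × (List (Int × Int)) := (3, [(0, 1), (1, 2), (2, 3)])

def Spec_solution (n : Int) (wires : List (Int × Int)) (out : Int) : Prop := out = solution_alt n wires
instance (n : Int) (wires : List (Int × Int)) (out : Int) : Decidable (Spec_solution n wires out) := by unfold Spec_solution; infer_instance

-- ===== CLAIM (what is proved, stated in full; the proofs are below) =====
def Claim_equal_solution : Prop := ∀ (n : Int) (wires : List (Int × Int)), Dom_solution n wires → Pre_solution n wires → Spec_solution n wires (solution n wires)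

-- ===== LEMMAS AND PROOFS =====

-- ---- proof-side abbreviations (used only below the claim block) ----

-- visited[x] / visited[x] = True as total functions (Pre_ keeps indices in range)
def pvGetv (V : List Bool) (x : Int) : Bool := PySem.List.pyGetD V x true
def pvSetv (V : List Bool) (x : Int) : List Bool := PySem.List.pySetD V x true

-- adjacency whose values (at in-range nodes) are in-range node labels
def pvGood (al : Int → List Int) (N : Nat) : Prop :=
  ∀ u, 0 ≤ u → u < (N : Int) → ∀ v ∈ al u, 0 ≤ v ∧ v < (N : Int)

-- nodes reachable from a through nodes unvisited in V (A's representation)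
inductive pvReach (al : Int → List Int) (V : List Bool) (a : Int) : Int → Prop
  | refl : pvReach al V a a
  | step {u v : Int} : pvReach al V a u → v ∈ al u → pvGetv V v = false → pvReach al V a v

-- what one traversal call of A (from the pending-starts list S, all marked) does:
-- P = processed nodes, V' = final visited list
def pvPost (al : Int → List Int) (V : List Bool) (S : List Int) (P : List Int) (V' : List Bool) : Prop :=
  P.Nodup ∧ (∀ s ∈ S, s ∈ P) ∧ V'.length = V.length ∧
  (∀ p ∈ P, 0 ≤ p ∧ p < (V.length : Int)) ∧
  (∀ p ∈ P, p ∈ S ∨ pvGetv V p = false) ∧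
  (∀ x : Int, 0 ≤ x → (pvGetv V' x = true ↔ pvGetv V x = true ∨ x ∈ P)) ∧
  (∀ p ∈ P, ∃ s ∈ S, pvReach al V s p) ∧
  (∀ p ∈ P, ∀ v ∈ al p, pvGetv V' v = true)

-- ---- small facts about pvGetv / pvSetv ----

theorem pvGetv_natCast (V : List Bool) (i : Nat) (h : i < V.length) :
    pvGetv V (i : Int) = V[i] := by
  unfold pvGetv
  rw [PySem.List.pyGetD_eq_getElem _ true (by omega) (by exact_mod_cast h)]
  simp

theorem length_pvSetv (V : List Bool) (x : Int) : (pvSetv V x).length = V.length := by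
  unfold pvSetv PySem.List.pySetD PySem.List.pySet?
  cases h : PySem.List.pyIdx? V.length x <;> simp

theorem pyGetD_pySetD_int {α : Type} (xs : List α) (v d : α) {i j : Int}
    (hi : 0 ≤ i) (hi2 : i < (xs.length : Int)) (hj : 0 ≤ j) :
    PySem.List.pyGetD (PySem.List.pySetD xs i v) j d =
      if j = i then v else PySem.List.pyGetD xs j d := by
  rw [PySem.List.pySetD_of_nonneg xs v hi]
  by_cases h : j < (xs.length : Int)
  · rw [PySem.List.pyGetD_eq_getElem _ d hj (by simpa using h),
      PySem.List.pyGetD_eq_getElem _ d hj h, List.getElem_set]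
    split_ifs with h1 h2 h3 <;> first | rfl | omega
  · rw [if_neg (by omega)]
    unfold PySem.List.pyGetD
    have e1 : PySem.List.pyGet? (xs.set i.toNat v) j = none := by
      rw [PySem.List.pyGet?_eq_none_iff]; unfold PySem.Raise.InRange; simp; omega
    have e2 : PySem.List.pyGet? xs j = none := by
      rw [PySem.List.pyGet?_eq_none_iff]; unfold PySem.Raise.InRange; omega
    rw [e1, e2]

theorem pvGetv_pvSetv (V : List Bool) {x y : Int} (hx : 0 ≤ x) (hx2 : x < (V.length : Int))
    (hy : 0 ≤ y) : pvGetv (pvSetv V x) y = (decide (y = x) || pvGetv V y) := by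
  unfold pvGetv pvSetv
  rw [pyGetD_pySetD_int V true true hx hx2 hy]
  by_cases h : y = x <;> simp [h]

-- ---- counting false entries (A's fuel bookkeeping) ----

def pvFc (V : List Bool) : Nat := V.count false

theorem pvFc_le (V : List Bool) : pvFc V ≤ V.length := by
  exact List.count_le_length

theorem pvFc_pvSetv (V : List Bool) {x : Int} (hx : 0 ≤ x) (hx2 : x < (V.length : Int))
    (hf : pvGetv V x = false) : pvFc V = pvFc (pvSetv V x) + 1 := by
  have hk : x.toNat < V.length := by omega
  have hfk : V[x.toNat] = false := by
    rw [← PySem.List.pyGetD_eq_getElem V true hx hx2]; exact hf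
  unfold pvFc pvSetv
  rw [PySem.List.pySetD_of_nonneg V true hx]
  clear hf hx2
  generalize x.toNat = k at *
  induction V generalizing k with
  | nil => simp at hk
  | cons b V ih =>
    cases k with
    | zero => simp_all
    | succ k =>
      simp only [List.length_cons, Nat.succ_lt_succ_iff] at hk
      simp only [List.getElem_cons_succ] at hfk
      simp [List.count_cons, List.set, ih k hk hfk]; omega

theorem pvEq_of_char {V V' : List Bool} (hlen : V'.length = V.length)
    (hch : ∀ x : Int, 0 ≤ x → (pvGetv V' x = true ↔ pvGetv V x = true)) : V' = V := by
  apply List.ext_getElem hlen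
  intro i h1 h2
  have hc := hch (i : Int) (by omega)
  rw [pvGetv_natCast V' i h1, pvGetv_natCast V i h2] at hc
  cases hV : V[i] <;> cases hV' : V'[i] <;> simp_all

-- lists whose pointwise truths differ by a Nodup set R of previously-false cells
theorem pvFc_char {V V' : List Bool} {R : List Int} (hlen : V'.length = V.length)
    (hnd : R.Nodup) (hR : ∀ r ∈ R, 0 ≤ r ∧ r < (V.length : Int) ∧ pvGetv V r = false)
    (hch : ∀ x : Int, 0 ≤ x → (pvGetv V' x = true ↔ pvGetv V x = true ∨ x ∈ R)) :
    pvFc V = pvFc V' + R.length := by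
  induction R generalizing V with
  | nil =>
    have hE : V' = V := pvEq_of_char hlen (fun x hx => by simpa using hch x hx)
    subst hE; simp
  | cons r R ih =>
    obtain ⟨hr0, hr1, hrf⟩ := hR r List.mem_cons_self
    have hrR : r ∉ R := (List.nodup_cons.mp hnd).1
    have hnd' : R.Nodup := (List.nodup_cons.mp hnd).2
    have hlenm : (pvSetv V r).length = V.length := length_pvSetv V r
    have hstep : pvFc V = pvFc (pvSetv V r) + 1 := pvFc_pvSetv V hr0 hr1 hrf
    have hR' : ∀ q ∈ R, 0 ≤ q ∧ q < ((pvSetv V r).length : Int) ∧ pvGetv (pvSetv V r) q = false := by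
      intro q hq
      obtain ⟨hq0, hq1, hqf⟩ := hR q (List.mem_cons_of_mem _ hq)
      refine ⟨hq0, by omega, ?_⟩
      rw [pvGetv_pvSetv V hr0 hr1 hq0]
      have : q ≠ r := fun he => hrR (he ▸ hq)
      simp [this, hqf]
    have hch' : ∀ x : Int, 0 ≤ x →
        (pvGetv V' x = true ↔ pvGetv (pvSetv V r) x = true ∨ x ∈ R) := by
      intro x hx
      rw [pvGetv_pvSetv V hr0 hr1 hx]
      have := hch x hx
      simp only [List.mem_cons] at this
      by_cases hxr : x = r <;> simp [hxr, hrf] at this ⊢ <;> tauto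
    have := ih (V := pvSetv V r) (by omega) hnd' hR' hch'
    simp only [List.length_cons]
    omega

-- ---- facts about pvReach / pvReachS ----

theorem pvReach_target {al V a x} (h : pvReach al V a x) : x = a ∨ pvGetv V x = false := by
  cases h with
  | refl => exact Or.inl rfl
  | step _ _ hf => exact Or.inr hf

theorem pvReach_trans {al V a b c} (h1 : pvReach al V a b) (h2 : pvReach al V b c) :
    pvReach al V a c := by
  induction h2 with
  | refl => exact h1
  | step _ hv hf ih => exact pvReach.step ih hv hf

theorem pvReach_inRange {al : Int → List Int} {N : Nat} {V : List Bool} {a x : Int}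
    (hg : pvGood al N) (ha : 0 ≤ a ∧ a < (N : Int)) (h : pvReach al V a x) :
    0 ≤ x ∧ x < (N : Int) := by
  induction h with
  | refl => exact ha
  | step hu hv _ ih => exact hg _ ih.1 ih.2 _ hv

-- chains in a more-visited list are chains in a less-visited one
theorem pvReach_of_le {al : Int → List Int} {N : Nat} {V W : List Bool} {a x : Int}
    (hmono : ∀ y : Int, 0 ≤ y → pvGetv W y = false → pvGetv V y = false)
    (hg : pvGood al N) (ha : 0 ≤ a ∧ a < (N : Int))
    (h : pvReach al W a x) : pvReach al V a x := by
  induction h with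
  | refl => exact pvReach.refl
  | step hu hv hf ih =>
    have hub := pvReach_inRange hg ha hu
    have hvb := hg _ hub.1 hub.2 _ hv
    exact pvReach.step ih hv (hmono _ hvb.1 hf)

-- ---- consequences of pvPost ----

theorem pvPost_mono {al V S P V'} (h : pvPost al V S P V') :
    ∀ x : Int, 0 ≤ x → pvGetv V x = true → pvGetv V' x = true := by
  obtain ⟨_, _, _, _, _, h6, _, _⟩ := h
  intro x hx ht
  exact (h6 x hx).mpr (Or.inl ht)

theorem pvPost_mem {al V S P V'} (h : pvPost al V S P V') (x : Int) :
    x ∈ P ↔ x ∈ S ∨ (0 ≤ x ∧ pvGetv V x = false ∧ pvGetv V' x = true) := by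
  obtain ⟨h1, h2, h3, h4, h5, h6, h7, h8⟩ := h
  constructor
  · intro hP
    rcases h5 x hP with hS | hf
    · exact Or.inl hS
    · exact Or.inr ⟨(h4 x hP).1, hf, (h6 x (h4 x hP).1).mpr (Or.inr hP)⟩
  · rintro (hS | ⟨hx0, hf, ht⟩)
    · exact h2 x hS
    · rcases (h6 x hx0).mp ht with hV | hP
      · rw [hV] at hf; cases hf
      · exact hP

theorem pvPost_char {al : Int → List Int} {N : Nat} {V : List Bool} {S P : List Int} {V' : List Bool}
    (hg : pvGood al N) (hN : V.length = N)
    (hS : ∀ s ∈ S, 0 ≤ s ∧ s < (N : Int) ∧ pvGetv V s = true)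
    (h : pvPost al V S P V') :
    ∀ x : Int, 0 ≤ x → (pvGetv V' x = true ↔ pvGetv V x = true ∨ ∃ s ∈ S, pvReach al V s x) := by
  have hc := h
  obtain ⟨h1, h2, h3, h4, h5, h6, h7, h8⟩ := hc
  intro x hx
  constructor
  · intro ht
    rcases (h6 x hx).mp ht with hV | hP
    · exact Or.inl hV
    · obtain ⟨s, hs, hr⟩ := h7 x hP
      exact Or.inr ⟨s, hs, hr⟩
  · rintro (hV | ⟨s, hs, hr⟩)
    · exact pvPost_mono h x hx hV
    · obtain ⟨hs0, hs1, hst⟩ := hS s hs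
      induction hr with
      | refl => exact (h6 s hs0).mpr (Or.inr (h2 s hs))
      | step hu hv hf ih =>
        rename_i u v
        have hub := pvReach_inRange hg ⟨hs0, hN ▸ hs1⟩ hu
        have hVu : pvGetv V' u = true := ih hub.1
        have huP : u ∈ P := by
          rcases (h6 u hub.1).mp hVu with hVt | hP
          · rcases pvReach_target hu with he | hfu
            · exact he ▸ h2 s hs
            · rw [hVt] at hfu; cases hfu
          · exact hP
        exact h8 u huP v hv

-- ---- the invariant of A's neighbour fold ----

def pvInv (al : Int → List Int) (V : List Bool) (a : Int) (W : List Bool) (Q : List Int) : Prop :=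
  Q.Nodup ∧ W.length = V.length ∧
  (∀ q ∈ Q, 0 ≤ q ∧ q < (V.length : Int) ∧ pvGetv V q = false) ∧
  (∀ x : Int, 0 ≤ x → (pvGetv W x = true ↔ pvGetv V x = true ∨ x ∈ Q)) ∧
  (∀ q ∈ Q, pvReach al V a q) ∧
  (∀ q ∈ Q, ∀ v ∈ al q, pvGetv W v = true)

-- the fold over the neighbour list inside dfsA maintains pvInv
theorem foldA_inv (g : PySem.Dict Int (List Int)) (fuel : Nat)
    (hrec : ∀ (V : List Bool) (a : Int),
      pvGood (fun u => g.getD u []) V.length →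
      0 ≤ a → a < (V.length : Int) → pvGetv V a = true → pvFc V < fuel →
      ∃ P V', dfsA g fuel V a = ((P.length : Int), V') ∧
        pvPost (fun u => g.getD u []) V [a] P V')
    (V : List Bool) (a : Int)
    (hg : pvGood (fun u => g.getD u []) V.length)
    (ha0 : 0 ≤ a) (ha1 : a < (V.length : Int))
    (hf : pvFc V ≤ fuel) :
    ∀ (l : List Int), (∀ v ∈ l, v ∈ g.getD a []) →
    ∀ (W : List Bool) (Q : List Int) (c0 : Int),
      pvInv (fun u => g.getD u []) V a W Q →
      ∃ D W',
        List.foldl (fun (st : Int × List Bool) v =>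
            if PySem.List.pyGetD st.2 v true = false then
              let st2 := dfsA g fuel (PySem.List.pySetD st.2 v true) v
              (st.1 + st2.1, st2.2)
            else st) (c0, W) l
          = (c0 + (D.length : Int), W') ∧
        pvInv (fun u => g.getD u []) V a W' (Q ++ D) ∧
        (∀ v ∈ l, pvGetv W' v = true) := by
  intro l
  induction l with
  | nil =>
    intro _ W Q c0 hinv
    exact ⟨[], W, by simp, by simpa using hinv, by simp⟩
  | cons v l ih =>
    intro hl W Q c0 hinv
    obtain ⟨i1, i2, i3, i4, i5, i6⟩ := hinv
    have hvl : v ∈ g.getD a [] := hl v List.mem_cons_self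
    have hvb := hg a ha0 ha1 v hvl
    have hvbW : v < (W.length : Int) := by omega
    rw [List.foldl_cons]
    by_cases hWv : PySem.List.pyGetD W v true = false
    · rw [if_pos (by exact hWv)]
      have hWvf : pvGetv W v = false := hWv
      have hVv : pvGetv V v = false := by
        cases hV : pvGetv V v with
        | false => rfl
        | true => rw [(i4 v hvb.1).mpr (Or.inl hV)] at hWvf; cases hWvf
      have hvQ : v ∉ Q := fun hq => by
        rw [(i4 v hvb.1).mpr (Or.inr hq)] at hWvf; cases hWvf
      -- fuel bookkeeping
      have hfcW : pvFc V = pvFc W + Q.length :=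
        pvFc_char i2 i1 i3 i4
      have hfcW1 : pvFc W = pvFc (pvSetv W v) + 1 :=
        pvFc_pvSetv W hvb.1 hvbW hWvf
      -- the recursive call
      have hlen1 : (pvSetv W v).length = V.length := by rw [length_pvSetv]; exact i2
      have hW1v : pvGetv (pvSetv W v) v = true := by
        rw [pvGetv_pvSetv W hvb.1 hvbW hvb.1]; simp
      obtain ⟨P, W2, heq, hpost⟩ := hrec (pvSetv W v) v (by rw [hlen1]; exact hg)
        hvb.1 (by rw [hlen1]; exact hvb.2) hW1v (by omega)
      obtain ⟨p1, p2, p3, p4, p5, p6, p7, p8⟩ := hpost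
      have hvP : v ∈ P := p2 v List.mem_cons_self
      -- marked-in-W1 vs V
      have hback : ∀ y : Int, 0 ≤ y → pvGetv (pvSetv W v) y = false → pvGetv V y = false := by
        intro y hy hf1
        rw [pvGetv_pvSetv W hvb.1 hvbW hy] at hf1
        rcases Bool.or_eq_false_iff.mp hf1 with ⟨_, hWy⟩
        cases hV : pvGetv V y with
        | false => rfl
        | true => rw [(i4 y hy).mpr (Or.inl hV)] at hWy; cases hWy
      have hPV : ∀ p ∈ P, pvGetv V p = false := by
        intro p hp
        rcases p5 p hp with hpv | hpf
        · simp only [List.mem_singleton] at hpv; exact hpv ▸ hVv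
        · exact hback p (p4 p hp).1 hpf
      have hQW1 : ∀ q ∈ Q, pvGetv (pvSetv W v) q = true := by
        intro q hq
        rw [pvGetv_pvSetv W hvb.1 hvbW (i3 q hq).1]
        rw [(i4 q (i3 q hq).1).mpr (Or.inr hq)]; simp
      have hdisj : ∀ q ∈ Q, q ∉ P := by
        intro q hq hqP
        rcases p5 q hqP with hqv | hqf
        · simp only [List.mem_singleton] at hqv; exact hvQ (hqv ▸ hq)
        · rw [hQW1 q hq] at hqf; cases hqf
      -- new invariant for W2, Q ++ P
      have hinv2 : pvInv (fun u => g.getD u []) V a W2 (Q ++ P) := by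
        refine ⟨?_, ?_, ?_, ?_, ?_, ?_⟩
        · exact i1.append p1 (fun q hq => hdisj q hq)
        · rw [p3]; exact hlen1
        · intro q hq
          rcases List.mem_append.mp hq with hqQ | hqP
          · exact i3 q hqQ
          · refine ⟨(p4 q hqP).1, by have := (p4 q hqP).2; omega, hPV q hqP⟩
        · intro x hx
          rw [p6 x hx, pvGetv_pvSetv W hvb.1 hvbW hx, Bool.or_eq_true, decide_eq_true_iff,
            i4 x hx, List.mem_append]
          constructor
          · rintro ((hxv | hV | hQ) | hP)
            · exact Or.inr (Or.inr (hxv ▸ hvP))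
            · exact Or.inl hV
            · exact Or.inr (Or.inl hQ)
            · exact Or.inr (Or.inr hP)
          · rintro (hV | hQ | hP)
            · exact Or.inl (Or.inr (Or.inl hV))
            · exact Or.inl (Or.inr (Or.inr hQ))
            · exact Or.inr hP
        · intro q hq
          rcases List.mem_append.mp hq with hqQ | hqP
          · exact i5 q hqQ
          · obtain ⟨s, hs, hr⟩ := p7 q hqP
            simp only [List.mem_singleton] at hs
            subst hs
            have hrV : pvReach (fun u => g.getD u []) V s q := by
              refine pvReach_of_le (N := V.length) hback ?_ ⟨hvb.1, hvb.2⟩ ?_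
              · exact hg
              · exact hr
            exact pvReach_trans (pvReach.step pvReach.refl hvl hVv) hrV
        · intro q hq w hw
          rcases List.mem_append.mp hq with hqQ | hqP
          · have hwW : pvGetv W w = true := i6 q hqQ w hw
            have hw0 : 0 ≤ w := (hg q (i3 q hqQ).1 (i3 q hqQ).2.1 w hw).1
            refine (p6 w hw0).mpr (Or.inl ?_)
            rw [pvGetv_pvSetv W hvb.1 hvbW hw0, hwW]; simp
          · exact p8 q hqP w hw
      unfold pvSetv at heq
      dsimp only
      rw [heq]
      obtain ⟨D', W3, heq2, hinv3, hcov⟩ := ih (fun w hwm => hl w (List.mem_cons_of_mem _ hwm))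
        W2 (Q ++ P) (c0 + (P.length : Int)) hinv2
      refine ⟨P ++ D', W3, ?_, ?_, ?_⟩
      · rw [heq2]; congr 1; push_cast [List.length_append]; omega
      · rw [List.append_assoc] at hinv3; exact hinv3
      · intro w hwm
        rcases List.mem_cons.mp hwm with hwv | hwl
        · subst hwv
          obtain ⟨j1, j2, j3, j4, j5, j6⟩ := hinv3
          exact (j4 w hvb.1).mpr (Or.inr (by
            rw [List.append_assoc]
            exact List.mem_append.mpr (Or.inr (List.mem_append.mpr (Or.inl hvP)))))
        · exact hcov w hwl
    · rw [if_neg hWv]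
      obtain ⟨D, W', heq, hinv', hcov⟩ := ih (fun w hwm => hl w (List.mem_cons_of_mem _ hwm))
        W Q c0 ⟨i1, i2, i3, i4, i5, i6⟩
      refine ⟨D, W', heq, hinv', ?_⟩
      intro w hwm
      rcases List.mem_cons.mp hwm with hwv | hwl
      · subst hwv
        have hWw : pvGetv W w = true := by
          cases hb : pvGetv W w with
          | false => exact absurd hb hWv
          | true => rfl
        obtain ⟨j1, j2, j3, j4, j5, j6⟩ := hinv'
        refine (j4 w hvb.1).mpr ?_
        rcases (i4 w hvb.1).mp hWw with hV | hQ
        · exact Or.inl hV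
        · exact Or.inr (List.mem_append.mpr (Or.inl hQ))
      · exact hcov w hwl

-- ---- A's traversal satisfies pvPost ----

theorem dfsA_post (g : PySem.Dict Int (List Int)) (fuel : Nat) :
    ∀ (V : List Bool) (a : Int),
      pvGood (fun u => g.getD u []) V.length →
      0 ≤ a → a < (V.length : Int) → pvGetv V a = true → pvFc V < fuel →
      ∃ P V', dfsA g fuel V a = ((P.length : Int), V') ∧
        pvPost (fun u => g.getD u []) V [a] P V' := by
  induction fuel with
  | zero => intro V a _ _ _ _ hfc; omega
  | succ fuel ih =>
    intro V a hg ha0 ha1 hm hfc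
    have hbase : pvInv (fun u => g.getD u []) V a V [] :=
      ⟨List.nodup_nil, rfl, by simp, by simp, by simp, by simp⟩
    obtain ⟨D, W', heq, hinv, hcov⟩ := foldA_inv g fuel ih V a hg ha0 ha1 (by omega)
      (g.getD a []) (fun _ h => h) V [] 0 hbase
    obtain ⟨j1, j2, j3, j4, j5, j6⟩ := hinv
    simp only [List.nil_append] at j1 j3 j4 j5 j6
    have haD : a ∉ D := fun hmem => by rw [(j3 a hmem).2.2] at hm; cases hm
    refine ⟨a :: D, W', ?_, ?_, ?_, ?_, ?_, ?_, ?_, ?_, ?_⟩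
    · show dfsA g (fuel + 1) V a = _
      have hun : dfsA g (fuel + 1) V a =
          (let r := List.foldl (fun (st : Int × List Bool) v =>
            if PySem.List.pyGetD st.2 v true = false then
              let st2 := dfsA g fuel (PySem.List.pySetD st.2 v true) v
              (st.1 + st2.1, st2.2)
            else st) (0, V) (g.getD a [])
          (r.1 + 1, r.2)) := rfl
      rw [hun, heq]
      simp only [List.length_cons]
      rw [Prod.mk.injEq]
      exact ⟨by push_cast; ring, rfl⟩
    · exact List.nodup_cons.mpr ⟨haD, j1⟩
    · intro s hs; simp only [List.mem_singleton] at hs; subst hs; exact List.mem_cons_self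
    · exact j2
    · intro p hp
      rcases List.mem_cons.mp hp with hpa | hpD
      · subst hpa; exact ⟨ha0, ha1⟩
      · exact ⟨(j3 p hpD).1, (j3 p hpD).2.1⟩
    · intro p hp
      rcases List.mem_cons.mp hp with hpa | hpD
      · exact Or.inl (by simp [hpa])
      · exact Or.inr (j3 p hpD).2.2
    · intro x hx
      rw [j4 x hx, List.mem_cons]
      constructor
      · rintro (hV | hD)
        · exact Or.inl hV
        · exact Or.inr (Or.inr hD)
      · rintro (hV | hxa | hD)
        · exact Or.inl hV
        · exact Or.inl (hxa ▸ hm)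
        · exact Or.inr hD
    · intro p hp
      rcases List.mem_cons.mp hp with hpa | hpD
      · exact ⟨a, List.mem_singleton.mpr rfl, hpa ▸ pvReach.refl⟩
      · exact ⟨a, List.mem_singleton.mpr rfl, j5 p hpD⟩
    · intro p hp w hw
      rcases List.mem_cons.mp hp with hpa | hpD
      · exact hcov w (hpa ▸ hw)
      · exact j6 p hpD w hw

-- ---- adjacency membership: both builds hold edge (u,v) iff some wire is
-- ---- (u,v) or (v,u) ----

theorem buildA_eq_flat (wires : List (Int × Int)) :
    ∀ g : PySem.Dict Int (List Int), wires.foldl (fun g p =>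
        (g.modify p.1 [] (· ++ [p.2])).modify p.2 [] (· ++ [p.1])) g
      = (wires.flatMap (fun p => [(p.1, p.2), (p.2, p.1)])).foldl
          (fun d q => d.modify q.1 [] (· ++ [q.2])) g := by
  induction wires with
  | nil => intro g; simp
  | cons p ws ih =>
    intro g
    rw [List.foldl_cons, List.flatMap_cons, List.foldl_append, ih]
    rfl

theorem mem_fold_modify (l : List (Int × Int)) (d : PySem.Dict Int (List Int)) (u v : Int) :
    v ∈ (l.foldl (fun d q => d.modify q.1 [] (· ++ [q.2])) d).getD u []
      ↔ v ∈ d.getD u [] ∨ (u, v) ∈ l := by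
  rw [PySem.Dict.getD_foldl_modify_append]
  simp only [List.mem_append, List.mem_map, List.mem_filter, beq_iff_eq]
  constructor
  · rintro (h | ⟨q, ⟨hq, hq1⟩, hq2⟩)
    · exact Or.inl h
    · exact Or.inr (by
        have : q = (u, v) := Prod.ext (by simpa using hq1) hq2
        exact this ▸ hq)
  · rintro (h | h)
    · exact Or.inl h
    · exact Or.inr ⟨(u, v), ⟨h, by simp⟩, rfl⟩

theorem mem_fold_adj (l : List (Int × Int)) :
    ∀ (adj : List (List Int)), (∀ p ∈ l, 0 ≤ p.1 ∧ p.1 < (adj.length : Int)) →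
    ∀ u v : Int, 0 ≤ u →
      (v ∈ PySem.List.pyGetD (l.foldl (fun adj p =>
          PySem.List.pySetD adj p.1 (PySem.List.pyGetD adj p.1 [] ++ [p.2])) adj) u []
        ↔ v ∈ PySem.List.pyGetD adj u [] ∨ (u, v) ∈ l) := by
  induction l with
  | nil => intro adj _ u v _; simp
  | cons p l ih =>
    intro adj hb u v hu
    obtain ⟨hp0, hp1⟩ := hb p List.mem_cons_self
    rw [List.foldl_cons]
    have hlen : (PySem.List.pySetD adj p.1 (PySem.List.pyGetD adj p.1 [] ++ [p.2])).length
        = adj.length := PySem.List.length_pySetD _ _ _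
    rw [ih _ (fun q hq => ⟨(hb q (List.mem_cons_of_mem _ hq)).1,
          by rw [hlen]; exact (hb q (List.mem_cons_of_mem _ hq)).2⟩) u v hu]
    rw [pyGetD_pySetD_int adj _ _ hp0 hp1 hu]
    by_cases he : u = p.1
    · subst he
      rw [if_pos rfl]
      constructor
      · rintro (h | h)
        · rcases List.mem_append.mp h with h1 | h2
          · exact Or.inl h1
          · simp only [List.mem_cons, List.not_mem_nil, or_false] at h2
            exact Or.inr (List.mem_cons.mpr (Or.inl (by
              rw [Prod.ext_iff]; exact ⟨rfl, h2⟩)))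
        · exact Or.inr (List.mem_cons.mpr (Or.inr h))
      · rintro (h | h)
        · exact Or.inl (List.mem_append.mpr (Or.inl h))
        · rcases List.mem_cons.mp h with h1 | h2
          · refine Or.inl (List.mem_append.mpr (Or.inr ?_))
            have : v = p.2 := congrArg Prod.snd h1
            simp [this]
          · exact Or.inr h2
    · rw [if_neg he]
      constructor
      · rintro (h | h)
        · exact Or.inl h
        · exact Or.inr (List.mem_cons.mpr (Or.inr h))
      · rintro (h | h)
        · exact Or.inl h
        · rcases List.mem_cons.mp h with h1 | h2
          · exact absurd (congrArg Prod.fst h1) he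
          · exact Or.inr h2

-- on in-range nodes, the two adjacency structures have the same neighbours
theorem adj_agree (n : Int) (wires : List (Int × Int))
    (hpre : ∀ p ∈ wires, (0 ≤ p.1 ∧ p.1 ≤ n) ∧ (0 ≤ p.2 ∧ p.2 ≤ n)) :
    ∀ u : Int, 0 ≤ u → ∀ v : Int,
      v ∈ (buildA wires).getD u [] ↔ v ∈ PySem.List.pyGetD (buildB n wires) u [] := by
  intro u hu v
  have hn0 : wires = [] ∨ 0 ≤ n := by
    cases wires with
    | nil => exact Or.inl rfl
    | cons p ws =>
      exact Or.inr (le_trans (hpre p List.mem_cons_self).1.1 (hpre p List.mem_cons_self).1.2)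
  have hbnd : ∀ p ∈ directedB wires,
      0 ≤ p.1 ∧ p.1 < ((List.replicate (n+1).toNat ([] : List Int)).length : Int) := by
    intro p hp
    rcases hn0 with h | h
    · subst h; simp [directedB] at hp
    · have hcast : (((n+1).toNat : Nat) : Int) = n + 1 := Int.toNat_of_nonneg (by omega)
      rw [List.length_replicate, hcast]
      rcases List.mem_append.mp hp with hw | hw
      · exact ⟨(hpre p hw).1.1, by have := (hpre p hw).1.2; omega⟩
      · obtain ⟨q, hq, rfl⟩ := List.mem_map.mp hw
        exact ⟨(hpre q hq).2.1, by have := (hpre q hq).2.2; omega⟩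
  unfold buildA buildB
  rw [buildA_eq_flat, mem_fold_modify, mem_fold_adj _ _ hbnd u v hu]
  simp only [PySem.Dict.getD_empty, List.not_mem_nil, false_or]
  have hrep : PySem.List.pyGetD (List.replicate (n+1).toNat ([] : List Int)) u []
      = ([] : List Int) := by
    by_cases hlt : u < ((List.replicate (n+1).toNat ([] : List Int)).length : Int)
    · rw [PySem.List.pyGetD_eq_getElem _ _ hu hlt, List.getElem_replicate]
    · unfold PySem.List.pyGetD
      have hnone : PySem.List.pyGet? (List.replicate (n+1).toNat ([] : List Int)) u = none := by
        rw [PySem.List.pyGet?_eq_none_iff]; unfold PySem.Raise.InRange; omega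
      rw [hnone]; rfl
  rw [hrep]
  simp only [List.not_mem_nil, false_or, List.mem_flatMap]
  constructor
  · rintro ⟨p, hp, hm⟩
    simp only [List.mem_cons, List.not_mem_nil, or_false] at hm
    rcases hm with h | h
    · exact List.mem_append.mpr (Or.inl (h ▸ hp))
    · exact List.mem_append.mpr (Or.inr (List.mem_map.mpr ⟨p, hp, h.symm⟩))
  · intro h
    rcases List.mem_append.mp h with hw | hw
    · exact ⟨(u, v), hw, by simp⟩
    · obtain ⟨q, hq, he⟩ := List.mem_map.mp hw
      exact ⟨q, hq, by
        have h1 : u = q.2 := (congrArg Prod.fst he).symm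
        have h2 : v = q.1 := (congrArg Prod.snd he).symm
        simp [h1, h2]⟩

theorem buildA_good (n : Int) (wires : List (Int × Int))
    (hpre : ∀ p ∈ wires, (0 ≤ p.1 ∧ p.1 ≤ n) ∧ (0 ≤ p.2 ∧ p.2 ≤ n)) :
    pvGood (fun u => (buildA wires).getD u []) (n+1).toNat := by
  intro u _ _ v hv
  unfold buildA at hv
  rw [buildA_eq_flat, mem_fold_modify] at hv
  simp only [PySem.Dict.getD_empty, List.not_mem_nil, false_or, List.mem_flatMap] at hv
  obtain ⟨p, hp, hm⟩ := hv
  obtain ⟨⟨h10, h11⟩, ⟨h20, h21⟩⟩ := hpre p hp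
  have hn0 : 0 ≤ n := le_trans h10 h11
  have hcast : (((n+1).toNat : Nat) : Int) = n + 1 := Int.toNat_of_nonneg (by omega)
  simp only [List.mem_cons, List.not_mem_nil, or_false] at hm
  rcases hm with h | h
  · have : v = p.2 := congrArg Prod.snd h
    exact ⟨this ▸ h20, by omega⟩
  · have : v = p.1 := congrArg Prod.snd h
    exact ⟨this ▸ h10, by omega⟩

-- ---- chains transport across membership-agreeing adjacencies ----

theorem pvReach_congr_mem {al bl : Int → List Int} {N : Nat} {V : List Bool} {a x : Int}
    (hagree : ∀ u : Int, 0 ≤ u → u < (N : Int) → ∀ w : Int, w ∈ al u ↔ w ∈ bl u)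
    (hg : pvGood al N) (ha : 0 ≤ a ∧ a < (N : Int))
    (h : pvReach al V a x) : pvReach bl V a x := by
  induction h with
  | refl => exact pvReach.refl
  | step hu hv hf ih =>
    have hub := pvReach_inRange hg ha hu
    exact pvReach.step ih ((hagree _ hub.1 hub.2 _).mp hv) hf

-- ---- B's inner fold (over one node's neighbour list): marks the new nodes
-- ---- and appends exactly them to the next frontier ----

theorem foldB_inner (l : List Int) :
    ∀ (W : List Bool) (nx : List Int), (∀ v ∈ l, 0 ≤ v ∧ v < (W.length : Int)) →
      ∃ M W',
        List.foldl (fun (st2 : List Bool × List Int) v =>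
            if PySem.List.pyGetD st2.1 v true = false then
              (PySem.List.pySetD st2.1 v true, st2.2 ++ [v])
            else st2) (W, nx) l = (W', nx ++ M) ∧
        M.Nodup ∧ (∀ m ∈ M, m ∈ l ∧ pvGetv W m = false) ∧
        W'.length = W.length ∧
        (∀ x : Int, 0 ≤ x → (pvGetv W' x = true ↔ pvGetv W x = true ∨ x ∈ M)) ∧
        (∀ v ∈ l, pvGetv W' v = true) := by
  induction l with
  | nil =>
    intro W nx _
    exact ⟨[], W, by simp, List.nodup_nil, by simp, rfl, by simp, by simp⟩
  | cons v l ih =>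
    intro W nx h
    have hvb := h v List.mem_cons_self
    rw [List.foldl_cons]
    by_cases hWv : PySem.List.pyGetD W v true = false
    · rw [if_pos (by exact hWv)]
      have hWvf : pvGetv W v = false := hWv
      have hlen1 : (PySem.List.pySetD W v true).length = W.length := length_pvSetv W v
      obtain ⟨M', W', heq, m1, m2, m3, m4, m5⟩ := ih (PySem.List.pySetD W v true) (nx ++ [v])
        (fun w hw => ⟨(h w (List.mem_cons_of_mem _ hw)).1, by
          have := (h w (List.mem_cons_of_mem _ hw)).2; omega⟩)
      have hgetv1 : ∀ y : Int, 0 ≤ y →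
          pvGetv (PySem.List.pySetD W v true) y = (decide (y = v) || pvGetv W y) := by
        intro y hy; exact pvGetv_pvSetv W hvb.1 hvb.2 hy
      have hvM' : v ∉ M' := by
        intro hv
        have := (m2 v hv).2
        rw [hgetv1 v hvb.1] at this; simp at this
      refine ⟨v :: M', W', ?_, List.nodup_cons.mpr ⟨hvM', m1⟩, ?_, by omega, ?_, ?_⟩
      · rw [heq]; simp
      · intro m hm
        rcases List.mem_cons.mp hm with hmv | hmM
        · exact ⟨hmv ▸ List.mem_cons_self, hmv ▸ hWvf⟩
        · obtain ⟨hml, hmf⟩ := m2 m hmM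
          rw [hgetv1 m (h m (List.mem_cons_of_mem _ hml)).1] at hmf
          rcases Bool.or_eq_false_iff.mp hmf with ⟨_, hmW⟩
          exact ⟨List.mem_cons_of_mem _ hml, hmW⟩
      · intro x hx
        rw [m4 x hx, hgetv1 x hx, Bool.or_eq_true, decide_eq_true_iff, List.mem_cons]
        tauto
      · intro w hw
        rcases List.mem_cons.mp hw with hwv | hwl
        · subst hwv
          refine (m4 w hvb.1).mpr (Or.inl ?_)
          rw [hgetv1 w hvb.1]; simp
        · exact m5 w hwl
    · rw [if_neg hWv]
      obtain ⟨M, W', heq, m1, m2, m4, m5, m6⟩ := ih W nx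
        (fun w hw => h w (List.mem_cons_of_mem _ hw))
      refine ⟨M, W', heq, m1, ?_, m4, m5, ?_⟩
      · exact fun m hm => ⟨List.mem_cons_of_mem _ (m2 m hm).1, (m2 m hm).2⟩
      · intro w hw
        rcases List.mem_cons.mp hw with hwv | hwl
        · subst hwv
          have hWw : pvGetv W w = true := by
            cases hb : pvGetv W w with
            | false => exact absurd hb hWv
            | true => rfl
          exact (m5 w hvb.1).mpr (Or.inl hWw)
        · exact m6 w hwl

-- ---- B's level fold: one whole frontier expansion ----

theorem foldB_level (adj : List (List Int)) (F : List Int) :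
    ∀ (W : List Bool) (nx : List Int),
      pvGood (fun u => PySem.List.pyGetD adj u []) W.length →
      (∀ u ∈ F, 0 ≤ u ∧ u < (W.length : Int)) →
      ∃ D W',
        List.foldl (fun (st : List Bool × List Int) u =>
            (PySem.List.pyGetD adj u []).foldl (fun (st2 : List Bool × List Int) v =>
              if PySem.List.pyGetD st2.1 v true = false then
                (PySem.List.pySetD st2.1 v true, st2.2 ++ [v])
              else st2) st) (W, nx) F = (W', nx ++ D) ∧
        D.Nodup ∧ (∀ d ∈ D, pvGetv W d = false ∧ ∃ u ∈ F, d ∈ PySem.List.pyGetD adj u []) ∧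
        W'.length = W.length ∧
        (∀ x : Int, 0 ≤ x → (pvGetv W' x = true ↔ pvGetv W x = true ∨ x ∈ D)) ∧
        (∀ u ∈ F, ∀ v ∈ PySem.List.pyGetD adj u [], pvGetv W' v = true) := by
  induction F with
  | nil =>
    intro W nx _ _
    exact ⟨[], W, by simp, List.nodup_nil, by simp, rfl, by simp, by simp⟩
  | cons u F ih =>
    intro W nx hg hF
    have hub := hF u List.mem_cons_self
    rw [List.foldl_cons]
    obtain ⟨M, W1, heqM, n1, n2, n3, n4, n5⟩ := foldB_inner (PySem.List.pyGetD adj u []) W nx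
      (fun v hv => hg u hub.1 hub.2 v hv)
    rw [heqM]
    have hgood1 : pvGood (fun w => PySem.List.pyGetD adj w []) W1.length := by
      rw [n3]; exact hg
    obtain ⟨D', W', heqD, d1, d2, d3, d4, d5⟩ := ih W1 (nx ++ M) hgood1
      (fun w hw => ⟨(hF w (List.mem_cons_of_mem _ hw)).1, by
        have := (hF w (List.mem_cons_of_mem _ hw)).2; omega⟩)
    have hMr : ∀ m ∈ M, 0 ≤ m := fun m hm => (hg u hub.1 hub.2 m (n2 m hm).1).1
    have hMW1 : ∀ m ∈ M, pvGetv W1 m = true :=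
      fun m hm => (n4 m (hMr m hm)).mpr (Or.inr hm)
    have hD'r : ∀ d ∈ D', 0 ≤ d := by
      intro d hd
      obtain ⟨_, u', hu', hdu'⟩ := d2 d hd
      exact (hgood1 u' (hF u' (List.mem_cons_of_mem _ hu')).1
        (by have := (hF u' (List.mem_cons_of_mem _ hu')).2; omega) d hdu').1
    refine ⟨M ++ D', W', ?_, ?_, ?_, by omega, ?_, ?_⟩
    · rw [heqD, List.append_assoc]
    · rw [List.nodup_append]
      refine ⟨n1, d1, ?_⟩
      intro a ha b hb he
      subst he
      have h1 := hMW1 a ha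
      have h2 := (d2 a hb).1
      rw [h1] at h2; cases h2
    · intro d hd
      rcases List.mem_append.mp hd with hdM | hdD
      · exact ⟨(n2 d hdM).2, u, List.mem_cons_self, (n2 d hdM).1⟩
      · obtain ⟨hdf, u', hu', hdu'⟩ := d2 d hdD
        refine ⟨?_, u', List.mem_cons_of_mem _ hu', hdu'⟩
        cases hV : pvGetv W d with
        | false => rfl
        | true =>
          rw [(n4 d (hD'r d hdD)).mpr (Or.inl hV)] at hdf; cases hdf
    · intro x hx
      rw [d4 x hx, n4 x hx, List.mem_append]
      tauto
    · intro w hw v hv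
      rcases List.mem_cons.mp hw with hwu | hwF
      · subst hwu
        have hvW1 := n5 v hv
        have hv0 : 0 ≤ v := (hg w hub.1 hub.2 v hv).1
        exact (d4 v hv0).mpr (Or.inl hvW1)
      · exact d5 w hwF v hv

-- ---- B's traversal satisfies pvPost ----

theorem bfsB_post (adj : List (List Int)) (fuel : Nat) :
    ∀ (V : List Bool) (F : List Int) (size : Int),
      pvGood (fun u => PySem.List.pyGetD adj u []) V.length →
      F.Nodup → (∀ x ∈ F, 0 ≤ x ∧ x < (V.length : Int) ∧ pvGetv V x = true) →
      pvFc V + 2 ≤ fuel →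
      ∃ P V', bfsB adj fuel V F size = (size + (P.length : Int), V') ∧
        pvPost (fun u => PySem.List.pyGetD adj u []) V F P V' := by
  induction fuel with
  | zero => intro V F size _ _ _ hfl; omega
  | succ fuel ih =>
    intro V F size hg hnd hF hfl
    by_cases hFe : F.isEmpty
    · have hFnil : F = [] := List.isEmpty_iff.mp hFe
      subst hFnil
      refine ⟨[], V, by simp [bfsB], ?_⟩
      exact ⟨List.nodup_nil, by simp, rfl, by simp, by simp, by simp, by simp, by simp⟩
    · obtain ⟨D, W1, heqD, d1, d2, d3, d4, d5⟩ := foldB_level adj F V [] hg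
        (fun x hx => ⟨(hF x hx).1, (hF x hx).2.1⟩)
      have hstep : bfsB adj (fuel + 1) V F size
          = bfsB adj fuel W1 D (size + (F.length : Int)) := by
        show (if F.isEmpty then _ else _) = _
        rw [if_neg (by simp [hFe]), heqD]
        simp
      have hDr : ∀ d ∈ D, 0 ≤ d ∧ d < (V.length : Int) := by
        intro d hd
        obtain ⟨_, u, hu, hdu⟩ := d2 d hd
        exact hg u (hF u hu).1 (hF u hu).2.1 d hdu
      have hFD : ∀ x ∈ F, x ∉ D := by
        intro x hx hxD
        have := (d2 x hxD).1
        rw [(hF x hx).2.2] at this; cases this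
      rcases List.eq_nil_or_concat' D with hDe | ⟨D0, dl, hDne⟩
      · -- no new node: the next step returns at once
        subst hDe
        have hW1V : W1 = V := pvEq_of_char d3 (fun x hx => by simpa using d4 x hx)
        obtain ⟨fuel, rfl⟩ : ∃ m, fuel = m + 1 := ⟨fuel - 1, by omega⟩
        have hret : bfsB adj (fuel + 1) W1 ([] : List Int) (size + (F.length : Int))
            = (size + (F.length : Int), W1) := by simp [bfsB]
        refine ⟨F, V, by rw [hstep, hret, hW1V], ?_⟩
        refine ⟨hnd, fun s hs => hs, rfl, fun p hp => ⟨(hF p hp).1, (hF p hp).2.1⟩,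
          fun p hp => Or.inl hp, ?_, fun p hp => ⟨p, hp, pvReach.refl⟩, ?_⟩
        · intro x hx
          constructor
          · exact fun h => Or.inl h
          · rintro (h | h)
            · exact h
            · exact (hF x h).2.2
        · intro p hp v hv
          have := d5 p hp v hv
          rw [hW1V] at this
          exact this
      · have hDne' : D ≠ [] := by rw [hDne]; simp
        have hDfc : pvFc V = pvFc W1 + D.length :=
          pvFc_char d3 d1 (fun d hd => ⟨(hDr d hd).1, (hDr d hd).2, (d2 d hd).1⟩) d4
        have hlen1 : ¬ D.length = 0 := by
          intro h; exact hDne' (List.eq_nil_of_length_eq_zero h)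
        have hgood1 : pvGood (fun u => PySem.List.pyGetD adj u []) W1.length := by
          rw [d3]; exact hg
        obtain ⟨P', V'', heq', hpost'⟩ := ih W1 D (size + (F.length : Int)) hgood1 d1
          (fun d hd => ⟨(hDr d hd).1, by rw [d3]; exact (hDr d hd).2,
            (d4 d (hDr d hd).1).mpr (Or.inr hd)⟩)
          (by omega)
        obtain ⟨p1, p2, p3, p4, p5, p6, p7, p8⟩ := hpost'
        have hFP' : ∀ x ∈ F, x ∉ P' := by
          intro x hx hxP
          rcases p5 x hxP with hxD | hxf
          · exact hFD x hx hxD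
          · rw [(d4 x (hF x hx).1).mpr (Or.inl (hF x hx).2.2)] at hxf; cases hxf
        refine ⟨F ++ P', V'', ?_, ?_, ?_, ?_, ?_, ?_, ?_, ?_, ?_⟩
        · rw [hstep, heq']
          congr 1
          push_cast [List.length_append]
          ring
        · rw [List.nodup_append]
          exact ⟨hnd, p1, fun a ha b hb he => hFP' a ha (he ▸ hb)⟩
        · exact fun s hs => List.mem_append.mpr (Or.inl hs)
        · rw [p3]; exact d3
        · intro p hp
          rcases List.mem_append.mp hp with h | h
          · exact ⟨(hF p h).1, (hF p h).2.1⟩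
          · exact ⟨(p4 p h).1, by have := (p4 p h).2; omega⟩
        · intro p hp
          rcases List.mem_append.mp hp with h | h
          · exact Or.inl h
          · rcases p5 p h with hpD | hpf
            · exact Or.inr (d2 p hpD).1
            · refine Or.inr ?_
              cases hV : pvGetv V p with
              | false => rfl
              | true =>
                rw [(d4 p (p4 p h).1).mpr (Or.inl hV)] at hpf; cases hpf
        · intro x hx
          rw [p6 x hx, d4 x hx, List.mem_append]
          constructor
          · rintro ((hV | hD) | hP)
            · exact Or.inl hV
            · exact Or.inr (Or.inr (p2 x hD))
            · exact Or.inr (Or.inr hP)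
          · rintro (hV | hxF | hP)
            · exact Or.inl (Or.inl hV)
            · exact Or.inl (Or.inl ((hF x hxF).2.2))
            · exact Or.inr hP
        · intro p hp
          rcases List.mem_append.mp hp with h | h
          · exact ⟨p, h, pvReach.refl⟩
          · obtain ⟨d, hd, hr⟩ := p7 p h
            have hback : ∀ y : Int, 0 ≤ y → pvGetv W1 y = false → pvGetv V y = false := by
              intro y hy hf
              cases hV : pvGetv V y with
              | false => rfl
              | true => rw [(d4 y hy).mpr (Or.inl hV)] at hf; cases hf
            have hrV : pvReach (fun u => PySem.List.pyGetD adj u []) V d p :=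
              pvReach_of_le (N := V.length) hback hg (hDr d hd) hr
            obtain ⟨hdf, u, hu, hdu⟩ := d2 d hd
            exact ⟨u, hu, pvReach_trans (pvReach.step pvReach.refl hdu hdf) hrV⟩
        · intro p hp v hv
          rcases List.mem_append.mp hp with h | h
          · have hvW1 := d5 p h v hv
            have hv0 : 0 ≤ v := (hg p (hF p h).1 (hF p h).2.1 v hv).1
            exact (p6 v hv0).mpr (Or.inl hvW1)
          · exact p8 p h v hv

-- ---- one call of A equals one call of B ----

theorem call_eq (g : PySem.Dict Int (List Int)) (adjl : List (List Int)) (V : List Bool)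
    (a : Int) (fuel : Nat)
    (hagree : ∀ u : Int, 0 ≤ u → u < (V.length : Int) → ∀ w : Int,
      w ∈ g.getD u [] ↔ w ∈ PySem.List.pyGetD adjl u [])
    (hg : pvGood (fun u => g.getD u []) V.length)
    (ha : 0 ≤ a) (ha2 : a < (V.length : Int)) (hm : pvGetv V a = true)
    (hfuel : V.length + 2 ≤ fuel) :
    ∃ (P : List Int) (V' : List Bool),
      dfsA g (V.length + 1) V a = ((P.length : Int), V') ∧
      bfsB adjl fuel V [a] 0 = ((P.length : Int), V') ∧
      pvPost (fun u => g.getD u []) V [a] P V' := by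
  have hfA : pvFc V < V.length + 1 := by have := pvFc_le V; omega
  obtain ⟨PA, VA, heqA, postA⟩ := dfsA_post g (V.length + 1) V a hg ha ha2 hm hfA
  have hgB : pvGood (fun u => PySem.List.pyGetD adjl u []) V.length := by
    intro u hu0 hu1 v hv
    exact hg u hu0 hu1 v ((hagree u hu0 hu1 v).mpr hv)
  obtain ⟨PB, VB, heqB, postB⟩ := bfsB_post adjl fuel V [a] 0 hgB (List.nodup_singleton a)
    (fun x hx => by simp only [List.mem_singleton] at hx; exact hx ▸ ⟨ha, ha2, hm⟩)
    (by have := pvFc_le V; omega)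
  have hSA : ∀ s ∈ [a], 0 ≤ s ∧ s < ((V.length : Nat) : Int) ∧ pvGetv V s = true := by
    intro s hs; simp only [List.mem_singleton] at hs; subst hs; exact ⟨ha, ha2, hm⟩
  have chA := pvPost_char (N := V.length) hg rfl hSA postA
  have chB := pvPost_char (N := V.length) hgB rfl hSA postB
  have hreach : ∀ x : Int, (∃ s ∈ [a], pvReach (fun u => g.getD u []) V s x) ↔
      (∃ s ∈ [a], pvReach (fun u => PySem.List.pyGetD adjl u []) V s x) := by
    intro x
    constructor
    · rintro ⟨s, hs, hr⟩
      simp only [List.mem_singleton] at hs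
      subst hs
      exact ⟨s, List.mem_singleton.mpr rfl,
        pvReach_congr_mem (N := V.length) hagree hg ⟨ha, ha2⟩ hr⟩
    · rintro ⟨s, hs, hr⟩
      simp only [List.mem_singleton] at hs
      subst hs
      exact ⟨s, List.mem_singleton.mpr rfl,
        pvReach_congr_mem (N := V.length)
          (fun u h1 h2 w => (hagree u h1 h2 w).symm) hgB ⟨ha, ha2⟩ hr⟩
  have hVAB : VA = VB := by
    apply pvEq_of_char (by rw [postA.2.2.1, postB.2.2.1])
    intro x hx
    rw [chA x hx, chB x hx, hreach x]
  have hPmem : ∀ x : Int, x ∈ PA ↔ x ∈ PB := by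
    intro x
    rw [pvPost_mem postA x, pvPost_mem postB x, hVAB]
  have hPlen : PA.length = PB.length :=
    ((List.perm_ext_iff_of_nodup postA.1 postB.1).mpr hPmem).length_eq
  refine ⟨PA, VA, heqA, ?_, postA⟩
  rw [heqB, hVAB, hPlen]
  congr 1
  omega

theorem pvSetv_def (V : List Bool) (x : Int) : PySem.List.pySetD V x true = pvSetv V x := rfl

-- ===== VERDICT (by name: the statement is the Claim_ definition above) =====
theorem solution_spec : Claim_equal_solution := by
  intro n wires hdom hpre
  unfold Spec_solution solution solution_alt
  refine PySem.List.foldl_congr_mem wires _ _ 100 ?_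
  intro acc p hp
  obtain ⟨⟨h10, h11⟩, h20, h21⟩ := hpre p hp
  have hn0 : 0 ≤ n := le_trans h10 h11
  have hcast : (((n+1).toNat : Nat) : Int) = n + 1 := Int.toNat_of_nonneg (by omega)
  have hgood := buildA_good n wires hpre
  dsimp only
  simp only [pvSetv_def]
  set V : List Bool := pvSetv (pvSetv (List.replicate (n+1).toNat false) p.1) p.2 with hV
  have hlen2 : V.length = (n+1).toNat := by
    rw [hV, length_pvSetv, length_pvSetv, List.length_replicate]
  have hlen2i : (V.length : Int) = n + 1 := by rw [hlen2]; exact hcast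
  have hli : ((List.replicate (n+1).toNat false).length : Int) = n + 1 := by
    rw [List.length_replicate]; exact hcast
  have hgetV : ∀ x : Int, 0 ≤ x → x < n + 1 →
      pvGetv V x = (decide (x = p.2) || decide (x = p.1)) := by
    intro x hx hxi
    rw [hV, pvGetv_pvSetv _ h20 (by rw [length_pvSetv]; omega) hx,
      pvGetv_pvSetv _ h10 (by omega) hx]
    have : pvGetv (List.replicate (n+1).toNat false) x = false := by
      unfold pvGetv
      rw [PySem.List.pyGetD_eq_getElem _ true hx (by omega)]
      simp
    rw [this]; simp
  have hagree : ∀ u : Int, 0 ≤ u → u < (V.length : Int) → ∀ w : Int,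
      w ∈ (buildA wires).getD u [] ↔ w ∈ PySem.List.pyGetD (buildB n wires) u [] := by
    intro u hu _ w
    exact adj_agree n wires hpre u hu w
  have hgood2 : pvGood (fun u => (buildA wires).getD u []) V.length := by
    rw [hlen2]; exact hgood
  have hm1 : pvGetv V p.1 = true := by rw [hgetV p.1 h10 (by omega)]; simp
  have hm2 : pvGetv V p.2 = true := by rw [hgetV p.2 h20 (by omega)]; simp
  obtain ⟨P1, V1, heqA1, heqB1, post1⟩ :=
    call_eq (buildA wires) (buildB n wires) V p.1 ((n+1).toNat + 2)
      hagree hgood2 h10 (by omega) hm1 (by omega)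
  have hV1len : V1.length = V.length := post1.2.2.1
  have hgoodV1 : pvGood (fun u => (buildA wires).getD u []) V1.length := by
    rw [hV1len]; exact hgood2
  have hagree1 : ∀ u : Int, 0 ≤ u → u < (V1.length : Int) → ∀ w : Int,
      w ∈ (buildA wires).getD u [] ↔ w ∈ PySem.List.pyGetD (buildB n wires) u [] := by
    intro u hu _ w
    exact adj_agree n wires hpre u hu w
  have hm2' : pvGetv V1 p.2 = true := pvPost_mono post1 p.2 h20 hm2
  obtain ⟨P2, V2, heqA2, heqB2, _⟩ :=
    call_eq (buildA wires) (buildB n wires) V1 p.2 ((n+1).toNat + 2)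
      hagree1 hgoodV1 h20 (by omega) hm2' (by omega)
  rw [heqA1, heqB1]
  dsimp only
  rw [heqA2, heqB2]
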